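-- pv_equiv track=rewrite | github.com/hygull/stkovrflw | CombinedList/main.py | get_combined_users
-- ===== SOURCE A (Python) =====
-- def get_combined_users(list1, list2):
-- 	usernames = set()
-- 	combined = []
--
-- 	for user in sorted(list2 + list1, key=lambda user: user[0]): # Do not use => list1 + list2
-- 		if not user[0] in usernames:
-- 			usernames.add(user[0])
-- 			combined.append(user)
--
-- 	return combined
-- ===== SOURCE B (Python) =====
-- def get_combined_users(list1, list2):
--     users_by_name = {}
--     for user in list2 + list1:  # same order as A: list2 first, so its entries win ties
--         users_by_name.setdefault(user[0], user)
--     return sorted(users_by_name.values(), key=lambda user: user[0])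
-- ===== Notes on version B (the rewrite author's own statement) =====
-- stated objective: simpler
-- what changed: A sorts the concatenation first and then dedups with a seen-set while scanning the sorted list; B dedups first by building a dict with setdefault over list2+list1 (first occurrence per key wins) and sorts the dict values afterward.
import Mathlib
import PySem

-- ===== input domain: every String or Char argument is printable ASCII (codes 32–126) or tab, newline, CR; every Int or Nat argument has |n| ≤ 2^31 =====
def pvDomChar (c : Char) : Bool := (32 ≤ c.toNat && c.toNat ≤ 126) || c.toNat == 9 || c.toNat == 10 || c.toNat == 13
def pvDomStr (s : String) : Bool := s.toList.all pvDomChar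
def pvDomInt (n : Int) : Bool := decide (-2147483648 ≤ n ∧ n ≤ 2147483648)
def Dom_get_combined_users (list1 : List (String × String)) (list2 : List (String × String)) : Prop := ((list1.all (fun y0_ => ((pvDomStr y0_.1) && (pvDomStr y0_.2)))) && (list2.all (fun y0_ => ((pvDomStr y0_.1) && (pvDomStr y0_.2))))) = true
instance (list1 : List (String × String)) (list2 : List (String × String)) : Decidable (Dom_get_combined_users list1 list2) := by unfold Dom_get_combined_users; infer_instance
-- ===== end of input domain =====

-- B dedups first (dict via setdefault over list2+list1) and sorts the values afterward,
-- the reverse of A's sort-then-scan-with-a-seen-set; objective: simpler decomposition.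


-- ===== PORT A =====
def get_combined_users (list1 : List (String × String)) (list2 : List (String × String)) : List (String × String) :=
  -- usernames = set(); combined = []; for user in sorted(list2 + list1, key=...): ...
  ((PySem.List.sorted (list2 ++ list1) (fun user => user.1) false).foldl
    (fun (st : PySem.Set String × List (String × String)) user =>
      if !(PySem.Set.contains st.1 user.1) then
        (PySem.Set.add st.1 user.1, st.2 ++ [user])
      else st)
    ((PySem.Set.empty : PySem.Set String), ([] : List (String × String)))).2

-- ===== PORT B =====
def get_combined_users_alt (list1 : List (String × String)) (list2 : List (String × String)) : List (String × String) :=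
  -- users_by_name = {}; for user in list2 + list1: users_by_name.setdefault(user[0], user)
  let users_by_name : PySem.Dict String (String × String) :=
    (list2 ++ list1).foldl (fun d user => PySem.Dict.setdefault d user.1 user) PySem.Dict.empty
  PySem.List.sorted (PySem.Dict.values users_by_name) (fun user => user.1) false

-- ===== PRECONDITION & SPEC =====
def Spec_get_combined_users (list1 : List (String × String)) (list2 : List (String × String)) (out : List (String × String)) : Prop := out = get_combined_users_alt list1 list2
instance (list1 : List (String × String)) (list2 : List (String × String)) (out : List (String × String)) : Decidable (Spec_get_combined_users list1 list2 out) := by unfold Spec_get_combined_users; infer_instance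

-- ===== CLAIM (what is proved, stated in full; the proofs are below) =====
def Claim_equal_get_combined_users : Prop := ∀ (list1 : List (String × String)) (list2 : List (String × String)), Dom_get_combined_users list1 list2 → Spec_get_combined_users list1 list2 (get_combined_users list1 list2)

-- ===== LEMMAS AND PROOFS =====

/-- First occurrence per key, given an already-seen key list (proof-only helper). -/
def pvFO (seen : List String) : List (String × String) → List (String × String)
  | [] => []
  | u :: t => if seen.contains u.1 then pvFO seen t else u :: pvFO (seen ++ [u.1]) t

theorem pvFO_cons (seen : List String) (u : String × String) (t : List (String × String)) :
    pvFO seen (u :: t) = if seen.contains u.1 then pvFO seen t else u :: pvFO (seen ++ [u.1]) t := rfl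

/-- A's loop computes pvFO. -/
theorem loopA_eq (l : List (String × String)) (s : PySem.Set String) (c : List (String × String)) :
    (l.foldl
      (fun (st : PySem.Set String × List (String × String)) user =>
        if !(PySem.Set.contains st.1 user.1) then
          (PySem.Set.add st.1 user.1, st.2 ++ [user])
        else st) (s, c)).2 = c ++ pvFO s l := by
  induction l generalizing s c with
  | nil => simp [pvFO]
  | cons u t ih =>
    rw [List.foldl_cons]
    by_cases h : u.1 ∈ s
    · have h1 : (!PySem.Set.contains s u.1) = false := by simp [PySem.Set.contains, h]
      simp only [h1, Bool.false_eq_true, if_false]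
      rw [ih]
      simp [pvFO_cons, h]
    · have h1 : (!PySem.Set.contains s u.1) = true := by simp [PySem.Set.contains, h]
      have h3 : PySem.Set.add s u.1 = s ++ [u.1] := by
        simp [PySem.Set.add, PySem.Set.contains, h]
      simp only [h1, if_true]
      rw [ih, h3]
      simp [pvFO_cons, h]

/-- B's dict loop: items are the pvFO of the tail over the keys already present. -/
theorem loopB_eq (l : List (String × String)) (d : PySem.Dict String (String × String)) :
    (l.foldl (fun d user => PySem.Dict.setdefault d user.1 user) d).items
      = d.items ++ (pvFO (d.items.map (fun p => p.1)) l).map (fun u => (u.1, u)) := by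
  induction l generalizing d with
  | nil => simp [pvFO]
  | cons u t ih =>
    have hc : PySem.Dict.contains d u.1 = (d.items.map (fun p => p.1)).contains u.1 := by
      simp [PySem.Dict.contains, List.any_eq]
    by_cases h : u.1 ∈ d.items.map (fun p => p.1)
    · have hsd : PySem.Dict.setdefault d u.1 u = d := by
        unfold PySem.Dict.setdefault
        rw [if_pos (by rw [hc]; simpa using h)]
      simp only [List.foldl_cons, hsd, pvFO_cons]
      rw [if_pos (by simpa using h), ih]
    · have hsd : PySem.Dict.setdefault d u.1 u
          = PySem.Dict.mk (d.items ++ [(u.1, u)]) := by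
        unfold PySem.Dict.setdefault
        rw [if_neg (by rw [hc]; simpa using h)]
      simp only [List.foldl_cons, hsd, pvFO_cons]
      rw [if_neg (by simpa using h), ih]
      simp

/-- filter of pvFO by one key. -/
theorem pvFO_filter (l : List (String × String)) (seen : List String) (k : String) :
    (pvFO seen l).filter (fun u => u.1 == k)
      = if k ∈ seen then [] else (l.filter (fun u => u.1 == k)).take 1 := by
  induction l generalizing seen with
  | nil => simp [pvFO]
  | cons u t ih =>
    by_cases hk : u.1 = k
    · subst hk
      by_cases h : u.1 ∈ seen
      · simp [pvFO_cons, h, ih]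
      · simp [pvFO_cons, h, ih]
    · by_cases h : u.1 ∈ seen
      · simp [pvFO_cons, h, ih, hk]
      · by_cases hs : k ∈ seen
        · simp [pvFO_cons, h, ih, hk, hs]
        · simp [pvFO_cons, h, ih, hk, hs, Ne.symm hk]

/-- every key of pvFO seen l is fresh w.r.t. seen. -/
theorem pvFO_fresh (l : List (String × String)) (seen : List String) :
    ∀ u ∈ pvFO seen l, u.1 ∉ seen := by
  induction l generalizing seen with
  | nil => simp [pvFO]
  | cons u t ih =>
    intro v hv
    by_cases h : u.1 ∈ seen
    · rw [pvFO_cons, if_pos (by simpa using h)] at hv; exact ih seen v hv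
    · rw [pvFO_cons, if_neg (by simpa using h)] at hv
      rcases List.mem_cons.1 hv with rfl | hv
      · exact h
      · intro hvs
        exact ih (seen ++ [u.1]) v hv (List.mem_append_left _ hvs)

/-- keys of pvFO are pairwise distinct. -/
theorem pvFO_keys_pairwise (l : List (String × String)) (seen : List String) :
    (pvFO seen l).Pairwise (fun a b => a.1 ≠ b.1) := by
  induction l generalizing seen with
  | nil => simp [pvFO]
  | cons u t ih =>
    by_cases h : u.1 ∈ seen
    · rw [pvFO_cons, if_pos (by simpa using h)]; exact ih seen
    · rw [pvFO_cons, if_neg (by simpa using h)]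
      refine List.pairwise_cons.2 ⟨?_, ih _⟩
      intro v hv he
      exact pvFO_fresh t (seen ++ [u.1]) v hv (List.mem_append_right _ (by simp [he]))

theorem pvFO_nodup (l : List (String × String)) (seen : List String) :
    (pvFO seen l).Nodup :=
  (pvFO_keys_pairwise l seen).imp (fun h he => h (congrArg Prod.fst he))

theorem pvFO_sublist (l : List (String × String)) (seen : List String) :
    (pvFO seen l).Sublist l := by
  induction l generalizing seen with
  | nil => simp [pvFO]
  | cons u t ih =>
    by_cases h : u.1 ∈ seen
    · rw [pvFO_cons, if_pos (by simpa using h)]; exact (ih seen).cons u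
    · rw [pvFO_cons, if_neg (by simpa using h)]; exact (ih _).cons₂ u

/-- membership characterisation through the per-key filter. -/
theorem mem_pvFO_iff (l : List (String × String)) (u : String × String) :
    u ∈ pvFO [] l ↔ u ∈ (l.filter (fun v => v.1 == u.1)).take 1 := by
  have h := pvFO_filter l [] u.1
  rw [if_neg (List.not_mem_nil)] at h
  constructor
  · intro hu
    rw [← h]
    exact List.mem_filter.2 ⟨hu, by simp⟩
  · intro hu
    rw [← h] at hu
    exact (List.mem_filter.1 hu).1

/-- stability of PySem's insertion sort: per-key filters are unchanged. -/
theorem insertBy_filter (ys : List (String × String)) (x : String × String) (k : String)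
    (hys : ys.Pairwise (fun a b => a.1 ≤ b.1)) :
    (PySem.List.insertBy (fun a b => decide (a.1 < b.1)) x ys).filter (fun u => u.1 == k)
      = ys.filter (fun u => u.1 == k) ++ if x.1 == k then [x] else [] := by
  induction ys with
  | nil =>
    rw [show PySem.List.insertBy (fun a b => decide (a.1 < b.1)) x [] = [x] from rfl]
    rw [List.filter_cons]
    split <;> simp
  | cons y ys ih =>
    rw [List.pairwise_cons] at hys
    by_cases hb : x.1 < y.1
    · rw [show PySem.List.insertBy (fun a b => decide (a.1 < b.1)) x (y :: ys) = x :: y :: ys by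
        simp [PySem.List.insertBy, hb]]
      by_cases hk : x.1 = k
      · have hnil : (y :: ys).filter (fun u => u.1 == k) = [] := by
          refine List.filter_eq_nil_iff.2 ?_
          intro v hv
          have hyv : y.1 ≤ v.1 := by
            rcases List.mem_cons.1 hv with rfl | hv
            · exact le_refl _
            · exact hys.1 v hv
          have : k < v.1 := lt_of_lt_of_le (hk ▸ hb) hyv
          simp [ne_of_gt this]
        rw [List.filter_cons_of_pos (by simp [hk]), hnil]
        simp [hk]
      · rw [List.filter_cons_of_neg (by simp [hk])]
        simp [hk]
    · rw [show PySem.List.insertBy (fun a b => decide (a.1 < b.1)) x (y :: ys)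
          = y :: PySem.List.insertBy (fun a b => decide (a.1 < b.1)) x ys by
        simp [PySem.List.insertBy, hb]]
      by_cases hy : y.1 = k
      · rw [List.filter_cons_of_pos (by simp [hy]), List.filter_cons_of_pos (by simp [hy]),
          ih hys.2]
        simp
      · rw [List.filter_cons_of_neg (by simp [hy]), List.filter_cons_of_neg (by simp [hy]),
          ih hys.2]

theorem sorted_filter (l : List (String × String)) (k : String) :
    (PySem.List.sorted l (fun u => u.1) false).filter (fun u => u.1 == k)
      = l.filter (fun u => u.1 == k) := by
  induction l using List.reverseRecOn with
  | nil => rfl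
  | append_singleton t x ih =>
    have hs : PySem.List.sorted (t ++ [x]) (fun u => u.1) false
        = PySem.List.insertBy (fun a b => decide (a.1 < b.1)) x
            (PySem.List.sorted t (fun u => u.1) false) := by
      rw [PySem.List.sorted_eq_foldl_insertBy, PySem.List.sorted_eq_foldl_insertBy,
        List.foldl_append]
      rfl
    rw [hs, insertBy_filter _ _ _ (PySem.List.sorted_pairwise t (fun u => u.1)), ih,
      List.filter_append]
    rw [List.filter_cons]
    split <;> simp

-- ===== VERDICT (by name: the statement is the Claim_ definition above) =====
theorem get_combined_users_spec : Claim_equal_get_combined_users := by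
  intro list1 list2 _
  unfold Spec_get_combined_users get_combined_users get_combined_users_alt
  rw [loopA_eq]
  show ([] : List (String × String)) ++ pvFO [] (PySem.List.sorted (list2 ++ list1) (fun u => u.1) false)
      = PySem.List.sorted
          (PySem.Dict.values ((list2 ++ list1).foldl
            (fun d user => PySem.Dict.setdefault d user.1 user) PySem.Dict.empty))
          (fun u => u.1) false
  have hB : PySem.Dict.values
      ((list2 ++ list1).foldl (fun d user => PySem.Dict.setdefault d user.1 user) PySem.Dict.empty)
      = pvFO [] (list2 ++ list1) := by
    unfold PySem.Dict.values
    rw [loopB_eq (list2 ++ list1) PySem.Dict.empty]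
    show (([] : List (String × (String × String)))
        ++ (pvFO (([] : List (String × (String × String))).map (fun p => p.1)) (list2 ++ list1)).map
            (fun u => (u.1, u))).map (fun x => x.2) = _
    simp [Function.comp_def]
  rw [hB, List.nil_append]
  symm
  apply PySem.List.sorted_eq_of_perm_of_pairwise_lt
  · rw [List.perm_ext_iff_of_nodup (pvFO_nodup _ _) (pvFO_nodup _ _)]
    intro u
    rw [mem_pvFO_iff, mem_pvFO_iff, sorted_filter]
  · have hle : (pvFO [] (PySem.List.sorted (list2 ++ list1) (fun u => u.1) false)).Pairwise
        (fun a b => a.1 ≤ b.1) :=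
      (PySem.List.sorted_pairwise (list2 ++ list1) (fun u => u.1)).sublist (pvFO_sublist _ _)
    have hne := pvFO_keys_pairwise (PySem.List.sorted (list2 ++ list1) (fun u => u.1) false) []
    exact (hle.and hne).imp (fun h => lt_of_le_of_ne h.1 h.2)
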